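-- pv_equiv track=rewrite | github.com/zyjhandsome/verilog-wavedrom | signal_order_extractor.py | _merge_signal_lists
-- ===== SOURCE A (Python) =====
-- from typing import List, Dict, Any, Optional, Tuple
--
-- def _merge_signal_lists(list1: List[str], list2: List[str]) -> List[str]:
--     """Merge two signal lists, avoiding duplicates.
--
--     Preserves order from list1, adds unique items from list2.
--     """
--     result = list(list1)
--     existing_lower = {s.lower() for s in result}
--
--     for sig in list2:
--         sig_lower = sig.lower()
--         # Check if similar signal already exists
--         is_duplicate = False
--         for existing in existing_lower:
--             # Check similarity
--             if sig_lower == existing: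
--                 is_duplicate = True
--                 break
--             if sig_lower in existing or existing in sig_lower:
--                 # One contains the other - might be same signal
--                 if abs(len(sig_lower) - len(existing)) <= 2:
--                     is_duplicate = True
--                     break
--
--         if not is_duplicate:
--             result.append(sig)
--             existing_lower.add(sig_lower)
--
--     return result
-- ===== SOURCE B (Python) =====
-- def _merge_signal_lists(list1, list2):
--     """Merge two signal lists, avoiding duplicates.
--
--     Same result as the quadratic scan, but instead of comparing each new
--     signal against every existing one, we keep:
--       - exact: the set of existing lowered names,
--       - subs:  the set of all substrings t of existing lowered names e
--                with len(e) - len(t) <= 2.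
--     A new lowered name sl is a near-duplicate iff sl is in subs (sl occurs
--     inside an existing name at most 2 longer) or some substring of sl of
--     length >= len(sl) - 2 is an existing name (an existing name occurs
--     inside sl, at most 2 shorter).
--     """
--     exact = set()
--     subs = set()
--
--     def add(e):
--         exact.add(e)
--         n = len(e)
--         for L in range(max(n - 2, 0), n + 1):
--             for i in range(n - L + 1):
--                 subs.add(e[i:i + L])
--
--     result = list(list1)
--     for s in result:
--         add(s.lower())
--
--     for sig in list2:
--         sl = sig.lower()
--         n = len(sl)
--         dup = sl in subs
--         if not dup:
--             for L in range(max(n - 2, 0), n + 1):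
--                 for i in range(n - L + 1):
--                     if sl[i:i + L] in exact:
--                         dup = True
--                         break
--                 if dup:
--                     break
--         if not dup:
--             result.append(sig)
--             add(sl)
--     return result
-- ===== Notes on version B (the rewrite author's own statement) =====
-- stated objective: faster
-- what changed: Instead of comparing each new signal against every existing lowered name, B maintains a set of exact lowered names plus a set of all substrings of existing names at most 2 shorter than their source, so each new signal is decided by O(L) set lookups (its own membership in the substring set, and membership of its own length>=n-2 substrings in the exact set) with no scan over existing entries.
import Mathlib
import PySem

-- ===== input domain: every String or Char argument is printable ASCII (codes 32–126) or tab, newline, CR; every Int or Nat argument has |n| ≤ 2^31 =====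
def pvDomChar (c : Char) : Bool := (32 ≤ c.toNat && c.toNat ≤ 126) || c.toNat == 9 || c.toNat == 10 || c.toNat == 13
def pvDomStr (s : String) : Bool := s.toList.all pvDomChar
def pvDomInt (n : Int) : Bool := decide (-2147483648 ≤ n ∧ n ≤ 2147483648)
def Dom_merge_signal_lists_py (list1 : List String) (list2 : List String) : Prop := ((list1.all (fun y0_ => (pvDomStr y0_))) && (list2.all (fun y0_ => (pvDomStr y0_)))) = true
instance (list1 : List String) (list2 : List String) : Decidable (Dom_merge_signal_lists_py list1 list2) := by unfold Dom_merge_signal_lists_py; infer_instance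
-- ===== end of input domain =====

-- B replaces A's per-signal scan over all existing names by a substring index
-- (set of all near-full-length substrings of existing names); measured faster.

-- ===== PORT A =====
-- The inner `for existing in existing_lower:` loop with `break` only computes a
-- disjunction over the set's elements — independent of Python's set-iteration
-- order — so it is ported as `List.any` over the PySem.Set.
def mslASim (sl e : List Char) : Bool :=
  if sl == e then true
  else if PySem.Chars.isIn sl e || PySem.Chars.isIn e sl then
    decide (((sl.length : Int) - (e.length : Int)).natAbs ≤ 2)
  else false

def mslALoop : List String → PySem.Set (List Char) → List String → List String
  | [], _, result => result
  | sig :: rest, existing, result =>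
    let sl := PySem.Chars.lower sig.toList
    if existing.any (fun e => mslASim sl e) then
      mslALoop rest existing result
    else
      mslALoop rest (PySem.Set.add existing sl) (result ++ [sig])

def merge_signal_lists_py (list1 : List String) (list2 : List String) : List String :=
  mslALoop list2 (PySem.Set.ofList (list1.map (fun s => PySem.Chars.lower s.toList))) list1

-- ===== PORT B =====
-- e[i:i+L] for 0 ≤ i, i + L ≤ len e is exactly (e.drop i).take L;
-- range(max(n-2,0), n+1) is List.range' (n - 2) (min 2 n + 1) (Nat subtraction).
def mslSubs (e : List Char) : List (List Char) :=
  (List.range' (e.length - 2) (min 2 e.length + 1)).flatMap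
    (fun L => (List.range (e.length - L + 1)).map (fun i => (e.drop i).take L))

def mslBAdd (st : PySem.Set (List Char) × PySem.Set (List Char)) (e : List Char) :
    PySem.Set (List Char) × PySem.Set (List Char) :=
  (PySem.Set.add st.1 e, PySem.Set.update st.2 (mslSubs e))

-- `dup = sl in subs; if not dup: <scan substrings of sl against exact>` is the
-- short-circuit disjunction below.
def mslBDup (sl : List Char) (st : PySem.Set (List Char) × PySem.Set (List Char)) : Bool :=
  st.2.contains sl || (mslSubs sl).any (fun t => st.1.contains t)

def mslBLoop : List String → (PySem.Set (List Char) × PySem.Set (List Char)) → List String → List String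
  | [], _, result => result
  | sig :: rest, st, result =>
    let sl := PySem.Chars.lower sig.toList
    if mslBDup sl st then mslBLoop rest st result
    else mslBLoop rest (mslBAdd st sl) (result ++ [sig])

def merge_signal_lists_py_alt (list1 : List String) (list2 : List String) : List String :=
  mslBLoop list2
    ((list1.map (fun s => PySem.Chars.lower s.toList)).foldl mslBAdd
      (PySem.Set.empty, PySem.Set.empty))
    list1

-- ===== PRECONDITION & SPEC =====
def Spec_merge_signal_lists_py (list1 : List String) (list2 : List String) (out : List String) : Prop := out = merge_signal_lists_py_alt list1 list2
instance (list1 : List String) (list2 : List String) (out : List String) : Decidable (Spec_merge_signal_lists_py list1 list2 out) := by unfold Spec_merge_signal_lists_py; infer_instance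

-- ===== CLAIM (what is proved, stated in full; the proofs are below) =====
def Claim_equal_merge_signal_lists_py : Prop := ∀ (list1 : List String) (list2 : List String), Dom_merge_signal_lists_py list1 list2 → Spec_merge_signal_lists_py list1 list2 (merge_signal_lists_py list1 list2)

-- ===== LEMMAS AND PROOFS =====

-- mslSubs e contains exactly the infixes of e at most 2 shorter than e.
lemma mem_mslSubs (t e : List Char) :
    t ∈ mslSubs e ↔ t <:+: e ∧ e.length ≤ t.length + 2 := by
  simp only [mslSubs, List.mem_flatMap, List.mem_map, List.mem_range'_1, List.mem_range]
  constructor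
  · rintro ⟨L, ⟨hL1, hL2⟩, i, hi, rfl⟩
    have hiL : i + L ≤ e.length := by omega
    have hlen : ((e.drop i).take L).length = L := by
      simp only [List.length_take, List.length_drop]; omega
    refine ⟨⟨e.take i, (e.drop i).drop L, ?_⟩, by omega⟩
    rw [List.append_assoc, List.take_append_drop, List.take_append_drop]
  · rintro ⟨⟨s, u, rfl⟩, hlen⟩
    have h1 : s.length + t.length + u.length = (s ++ t ++ u).length := by
      simp only [List.length_append]
    refine ⟨t.length, ⟨by omega, by omega⟩, s.length, by omega, ?_⟩
    rw [List.append_assoc, List.drop_left, List.take_left]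

lemma mslASim_iff (sl e : List Char) :
    mslASim sl e = true ↔
      (sl <:+: e ∧ e.length ≤ sl.length + 2) ∨ (e <:+: sl ∧ sl.length ≤ e.length + 2) := by
  unfold mslASim
  by_cases heq : sl = e
  · subst heq
    simp only [BEq.rfl, if_true, true_iff]
    exact Or.inl ⟨List.infix_rfl, by omega⟩
  · rw [if_neg (by simpa using heq)]
    by_cases h1 : sl <:+: e <;> by_cases h2 : e <:+: sl
    · rw [if_pos (by simp [PySem.Chars.isIn_iff_infix, h1])]
      have := h1.length_le
      have := h2.length_le
      simp only [decide_eq_true_eq]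
      constructor
      · intro h; exact Or.inl ⟨h1, by omega⟩
      · intro _; omega
    · rw [if_pos (by simp [PySem.Chars.isIn_iff_infix, h1])]
      have := h1.length_le
      simp only [decide_eq_true_eq]
      constructor
      · intro h; exact Or.inl ⟨h1, by omega⟩
      · rintro (⟨_, h⟩ | ⟨h, _⟩); · omega
        · exact absurd h h2
    · rw [if_pos (by simp [PySem.Chars.isIn_iff_infix, h2])]
      have := h2.length_le
      simp only [decide_eq_true_eq]
      constructor
      · intro h; exact Or.inr ⟨h2, by omega⟩
      · rintro (⟨h, _⟩ | ⟨_, h⟩); · exact absurd h h1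
        · omega
    · rw [if_neg (by simp [PySem.Chars.isIn_iff_infix, h1, h2])]
      simp only [Bool.false_eq_true, false_iff]
      rintro (⟨h, _⟩ | ⟨h, _⟩)
      · exact h1 h
      · exact h2 h

-- The invariant tying A's set of existing lowered names to B's (exact, subs) pair.
def mslInv (existing : PySem.Set (List Char))
    (st : PySem.Set (List Char) × PySem.Set (List Char)) : Prop :=
  st.1 = existing ∧ ∀ t, t ∈ st.2 ↔ ∃ e ∈ existing, t ∈ mslSubs e

lemma mslDup_eq (sl : List Char) (existing : PySem.Set (List Char))
    (st : PySem.Set (List Char) × PySem.Set (List Char)) (hInv : mslInv existing st) :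
    existing.any (fun e => mslASim sl e) = mslBDup sl st := by
  rw [Bool.eq_iff_iff]
  simp only [List.any_eq_true, mslBDup, Bool.or_eq_true, PySem.Set.contains_iff,
    mslASim_iff, hInv.1, hInv.2, mem_mslSubs]
  constructor
  · rintro ⟨e, he, h | h⟩
    · exact Or.inl ⟨e, he, h⟩
    · exact Or.inr ⟨e, ⟨h, he⟩⟩
  · rintro (⟨e, he, h⟩ | ⟨e, h, he⟩)
    · exact ⟨e, he, Or.inl h⟩
    · exact ⟨e, he, Or.inr h⟩

lemma mslInv_add (sl : List Char) (existing : PySem.Set (List Char))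
    (st : PySem.Set (List Char) × PySem.Set (List Char)) (hInv : mslInv existing st) :
    mslInv (PySem.Set.add existing sl) (mslBAdd st sl) := by
  refine ⟨by simp [mslBAdd, hInv.1], fun t => ?_⟩
  simp only [mslBAdd, PySem.Set.mem_update, hInv.2, PySem.Set.mem_add]
  constructor
  · rintro (⟨e, he, h⟩ | h)
    · exact ⟨e, Or.inl he, h⟩
    · exact ⟨sl, Or.inr rfl, h⟩
  · rintro ⟨e, he | rfl, h⟩
    · exact Or.inl ⟨e, he, h⟩
    · exact Or.inr h

lemma mslLoop_eq (l2 : List String) (existing : PySem.Set (List Char))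
    (st : PySem.Set (List Char) × PySem.Set (List Char)) (result : List String)
    (hInv : mslInv existing st) :
    mslALoop l2 existing result = mslBLoop l2 st result := by
  induction l2 generalizing existing st result with
  | nil => rfl
  | cons sig rest ih =>
    simp only [mslALoop, mslBLoop]
    rw [mslDup_eq (PySem.Chars.lower sig.toList) existing st hInv]
    by_cases h : mslBDup (PySem.Chars.lower sig.toList) st
    · rw [if_pos h, if_pos h]; exact ih existing st result hInv
    · rw [if_neg h, if_neg h]
      exact ih _ _ _ (mslInv_add _ existing st hInv)

lemma mslInv_foldl (l : List (List Char)) (existing : PySem.Set (List Char))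
    (st : PySem.Set (List Char) × PySem.Set (List Char)) (hInv : mslInv existing st) :
    mslInv (l.foldl PySem.Set.add existing) (l.foldl mslBAdd st) := by
  induction l generalizing existing st with
  | nil => exact hInv
  | cons e rest ih =>
    simp only [List.foldl_cons]
    exact ih _ _ (mslInv_add e existing st hInv)

lemma mslInv_empty : mslInv PySem.Set.empty (PySem.Set.empty, PySem.Set.empty) := by
  refine ⟨rfl, fun t => ?_⟩
  simp [PySem.Set.empty]

-- ===== VERDICT (by name: the statement is the Claim_ definition above) =====
theorem merge_signal_lists_py_spec : Claim_equal_merge_signal_lists_py := by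
  intro list1 list2 _
  unfold Spec_merge_signal_lists_py merge_signal_lists_py merge_signal_lists_py_alt
  rw [PySem.Set.ofList_eq_foldl]
  exact mslLoop_eq list2 _ _ list1 (mslInv_foldl _ _ _ mslInv_empty)
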